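-- pv_equiv track=rewrite | github.com/teratensor/Prediction | 5_ball_predict/1_ball1ball6_ml/predict.py | predict_ball_individual
-- ===== SOURCE A (Python) =====
-- from typing import List, Dict, Tuple
-- from collections import Counter
--
-- def predict_ball_individual(
--     past_data: List[Dict],
--     ball_pos: str,  # 'ball1', 'ball2', ..., 'ball6'
--     top_k: int = 20
-- ) -> List[Tuple[int, float]]:
--     """
--     개별 ball 위치 예측 (빈도 기반)
--
--     Args:
--         past_data: 과거 데이터
--         ball_pos: 예측할 ball 위치 ('ball1' ~ 'ball6')
--         top_k: 상위 K개 반환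
--
--     Returns:
--         [(ball_number, score), ...] 점수 높은 순
--     """
--     recent_10 = past_data[-10:] if len(past_data) >= 10 else past_data
--     recent_20 = past_data[-20:] if len(past_data) >= 20 else past_data
--
--     freq_10 = Counter(d[ball_pos] for d in recent_10)
--     freq_20 = Counter(d[ball_pos] for d in recent_20)
--
--     candidates = []
--     for num in range(1, 46):
--         # 빈도 점수 (최근 10회 가중치 2배)
--         freq_score = freq_10.get(num, 0) * 2 + freq_20.get(num, 0)
--         candidates.append((num, freq_score))
--
--     candidates.sort(key=lambda x: -x[1])
--     return candidates[:top_k]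
-- ===== SOURCE B (Python) =====
-- def predict_ball_individual(past_data, ball_pos, top_k=20):
--     # One weighted pass over the last 20 draws (last 10 weigh 3 = 2*1+1),
--     # then a descending-score scan over the bounded score range instead of a sort.
--     recent_20 = past_data[-20:] if len(past_data) >= 20 else past_data
--     cut = max(len(recent_20) - 10, 0)
--     score = {}
--     for d in recent_20[:cut]:
--         v = d[ball_pos]
--         score[v] = score.get(v, 0) + 1
--     for d in recent_20[cut:]:
--         v = d[ball_pos]
--         score[v] = score.get(v, 0) + 3
--     out = []
--     for s in range(40, -1, -1):
--         for num in range(1, 46):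
--             if score.get(num, 0) == s:
--                 out.append((num, s))
--     return out[:top_k]
-- ===== Notes on version B (the rewrite author's own statement) =====
-- stated objective: alternative
-- what changed: B replaces A's two Counters plus stable comparison sort by a single weighted frequency pass over the last 20 draws (weight 3 for the last 10, 1 otherwise) and a counting-sort-style descending scan over the bounded score range 40..0, emitting numbers in ascending order per score, so no sort is performed.
import Mathlib
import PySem

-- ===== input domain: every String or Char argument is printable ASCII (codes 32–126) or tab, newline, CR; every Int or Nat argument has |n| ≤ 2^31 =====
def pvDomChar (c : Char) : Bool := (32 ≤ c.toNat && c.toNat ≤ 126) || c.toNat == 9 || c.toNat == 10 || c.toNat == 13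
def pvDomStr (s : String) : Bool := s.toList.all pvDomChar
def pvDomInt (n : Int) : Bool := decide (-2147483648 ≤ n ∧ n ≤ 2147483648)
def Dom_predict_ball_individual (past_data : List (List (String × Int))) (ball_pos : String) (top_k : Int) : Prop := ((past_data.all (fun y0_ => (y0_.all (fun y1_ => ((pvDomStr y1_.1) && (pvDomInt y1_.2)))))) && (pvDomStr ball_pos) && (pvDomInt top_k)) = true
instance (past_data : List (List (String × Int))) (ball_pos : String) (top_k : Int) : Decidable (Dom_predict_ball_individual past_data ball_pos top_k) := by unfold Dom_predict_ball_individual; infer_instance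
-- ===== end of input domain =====

-- B replaces A's two Counters + stable sort by one weighted counting pass and a descending-score
-- counting-sort scan over the bounded score range (objective: alternative algorithm, same cost class).


-- ===== PORT A =====
-- d[ball_pos]: a KeyError (get? = none) is excluded by Pre_; both ports use this same total helper
def pvKeyGet (row : List (String × Int)) (k : String) : Int :=
  match PySem.Dict.get? ⟨row⟩ k with
  | some v => v
  | none => 0

def predict_ball_individual (past_data : List (List (String × Int))) (ball_pos : String) (top_k : Int) : List (Int × Int) :=
  let recent_10 := if 10 ≤ (past_data.length : Int) then PySem.List.slice past_data (some (-10)) none else past_data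
  let recent_20 := if 20 ≤ (past_data.length : Int) then PySem.List.slice past_data (some (-20)) none else past_data
  let freq_10 := PySem.Dict.counter (recent_10.map (fun d => pvKeyGet d ball_pos))
  let freq_20 := PySem.Dict.counter (recent_20.map (fun d => pvKeyGet d ball_pos))
  let candidates := (PySem.List.pyRange 1 46 1).foldl
    (fun acc num => acc ++ [(num, PySem.Dict.getD freq_10 num 0 * 2 + PySem.Dict.getD freq_20 num 0)]) []
  let cands := PySem.List.sorted candidates (fun x => -x.2) false
  PySem.List.slice cands none (some top_k)

-- ===== PORT B =====
def predict_ball_individual_alt (past_data : List (List (String × Int))) (ball_pos : String) (top_k : Int) : List (Int × Int) :=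
  let recent_20 := if 20 ≤ (past_data.length : Int) then PySem.List.slice past_data (some (-20)) none else past_data
  let cut : Int := max ((recent_20.length : Int) - 10) 0
  let score1 := (PySem.List.slice recent_20 none (some cut)).foldl
    (fun d row => PySem.Dict.insert d (pvKeyGet row ball_pos) (PySem.Dict.getD d (pvKeyGet row ball_pos) 0 + 1)) PySem.Dict.empty
  let score := (PySem.List.slice recent_20 (some cut) none).foldl
    (fun d row => PySem.Dict.insert d (pvKeyGet row ball_pos) (PySem.Dict.getD d (pvKeyGet row ball_pos) 0 + 3)) score1
  let out := (PySem.List.pyRange 40 (-1) (-1)).foldl (fun acc s =>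
    (PySem.List.pyRange 1 46 1).foldl (fun acc num =>
      if PySem.Dict.getD score num 0 == s then acc ++ [(num, s)] else acc) acc) []
  PySem.List.slice out none (some top_k)

-- ===== PRECONDITION & SPEC =====
-- Pre_ excludes exactly the inputs on which A raises KeyError: a row among the last 20 lacking the key ball_pos
def Pre_predict_ball_individual (past_data : List (List (String × Int))) (ball_pos : String) (top_k : Int) : Prop :=
  ((past_data.drop (past_data.length - 20)).all (fun row => (PySem.Dict.get? ⟨row⟩ ball_pos).isSome)) = true
instance (past_data : List (List (String × Int))) (ball_pos : String) (top_k : Int) : Decidable (Pre_predict_ball_individual past_data ball_pos top_k) := by unfold Pre_predict_ball_individual; infer_instance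
def pvWitness_predict_ball_individual : (List (List (String × Int))) × String × Int := ([[("b", 7)], [("b", 3)]], "b", 3)

def Spec_predict_ball_individual (past_data : List (List (String × Int))) (ball_pos : String) (top_k : Int) (out : List (Int × Int)) : Prop := out = predict_ball_individual_alt past_data ball_pos top_k
instance (past_data : List (List (String × Int))) (ball_pos : String) (top_k : Int) (out : List (Int × Int)) : Decidable (Spec_predict_ball_individual past_data ball_pos top_k out) := by unfold Spec_predict_ball_individual; infer_instance

-- ===== CLAIM (what is proved, stated in full; the proofs are below) =====
def Claim_equal_predict_ball_individual : Prop := ∀ (past_data : List (List (String × Int))) (ball_pos : String) (top_k : Int), Dom_predict_ball_individual past_data ball_pos top_k → Pre_predict_ball_individual past_data ball_pos top_k → Spec_predict_ball_individual past_data ball_pos top_k (predict_ball_individual past_data ball_pos top_k)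

-- ===== LEMMAS AND PROOFS =====

-- abbreviations (definitionally equal to the corresponding let-bound values of the two ports)
def pvR20 (pd : List (List (String × Int))) : List (List (String × Int)) :=
  if 20 ≤ (pd.length : Int) then PySem.List.slice pd (some (-20)) none else pd
def pvR10 (pd : List (List (String × Int))) : List (List (String × Int)) :=
  if 10 ≤ (pd.length : Int) then PySem.List.slice pd (some (-10)) none else pd
def pvCut (pd : List (List (String × Int))) : Int := max (((pvR20 pd).length : Int) - 10) 0
def pvF (pd : List (List (String × Int))) (bp : String) (num : Int) : Int :=
  PySem.Dict.getD (PySem.Dict.counter ((pvR10 pd).map (fun d => pvKeyGet d bp))) num 0 * 2 +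
  PySem.Dict.getD (PySem.Dict.counter ((pvR20 pd).map (fun d => pvKeyGet d bp))) num 0
def pvScore (pd : List (List (String × Int))) (bp : String) : PySem.Dict Int Int :=
  (PySem.List.slice (pvR20 pd) (some (pvCut pd)) none).foldl
    (fun d row => PySem.Dict.insert d (pvKeyGet row bp) (PySem.Dict.getD d (pvKeyGet row bp) 0 + 3))
    ((PySem.List.slice (pvR20 pd) none (some (pvCut pd))).foldl
      (fun d row => PySem.Dict.insert d (pvKeyGet row bp) (PySem.Dict.getD d (pvKeyGet row bp) 0 + 1)) PySem.Dict.empty)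
def pvG (pd : List (List (String × Int))) (bp : String) (num : Int) : Int :=
  PySem.Dict.getD (pvScore pd bp) num 0

-- the lexicographic order realised by Python's stable sort on (num, score) pairs with distinct nums
def pvR (a b : Int × Int) : Prop := -a.2 < -b.2 ∨ (-a.2 = -b.2 ∧ a.1 < b.1)

lemma pvR_of_pvR_le {a b : Int × Int} (h : pvR a b) : -a.2 ≤ -b.2 := by
  rcases h with h | ⟨h, _⟩ <;> omega

lemma pvR_antisymm (a b : Int × Int) (h1 : pvR a b) (h2 : pvR b a) : a = b := by
  exfalso
  rcases h1 with h1 | ⟨h1, h1'⟩ <;> rcases h2 with h2 | ⟨h2, h2'⟩ <;> omega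

-- stability of insertion: inserting x after all earlier elements (which have smaller fst) keeps pvR
lemma pv_insertBy_pairwise (x : Int × Int) :
    ∀ (zs : List (Int × Int)), zs.Pairwise pvR → (∀ z ∈ zs, z.1 < x.1) →
    (PySem.List.insertBy (fun a b => decide (-a.2 < -b.2)) x zs).Pairwise pvR
  | [], _, _ => by simp [PySem.List.insertBy, pvR]
  | z :: zs, h1, h2 => by
    rw [List.pairwise_cons] at h1
    by_cases hc : -x.2 < -z.2
    · have hxz : (decide (-x.2 < -z.2)) = true := by simpa using hc
      simp only [PySem.List.insertBy]
      rw [if_pos hxz]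
      refine List.pairwise_cons.2 ⟨?_, List.pairwise_cons.2 ⟨h1.1, h1.2⟩⟩
      intro w hw
      rcases List.mem_cons.1 hw with rfl | hw
      · exact Or.inl hc
      · exact Or.inl (lt_of_lt_of_le hc (pvR_of_pvR_le (h1.1 w hw)))
    · have hxz : ¬((decide (-x.2 < -z.2)) = true) := by simpa using hc
      simp only [PySem.List.insertBy]
      rw [if_neg hxz]
      refine List.pairwise_cons.2 ⟨?_, pv_insertBy_pairwise x zs h1.2 (fun w hw => h2 w (List.mem_cons_of_mem z hw))⟩
      intro w hw
      rcases (PySem.List.mem_insertBy _ _ _ _).1 hw with rfl | hw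
      · rcases lt_or_eq_of_le (not_lt.1 hc) with hlt | heq
        · exact Or.inl hlt
        · exact Or.inr ⟨heq, h2 z (by simp)⟩
      · exact h1.1 w hw

lemma pv_sorted_pairwise (l : List (Int × Int)) (hl : l.Pairwise (fun a b => a.1 < b.1)) :
    (PySem.List.sorted l (fun p => -p.2) false).Pairwise pvR := by
  induction l using List.reverseRecOn with
  | nil => simp [PySem.List.sorted_eq_foldl_insertBy]
  | append_singleton l x ih =>
    rw [List.pairwise_append] at hl
    rw [PySem.List.sorted_eq_foldl_insertBy, List.foldl_append, List.foldl_cons, List.foldl_nil,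
      ← PySem.List.sorted_eq_foldl_insertBy]
    exact pv_insertBy_pairwise x _ (ih hl.1)
      (fun z hz => hl.2.2 z ((PySem.List.mem_sorted _ _ _ _).1 hz) x (by simp))

-- bucket decomposition: flatMap of score-filters over a nodup score list covering all keys is a permutation
lemma pv_flatMap_filter_perm :
    ∀ (scores : List Int) (l : List (Int × Int)), scores.Nodup → (∀ p ∈ l, p.2 ∈ scores) →
    (scores.flatMap (fun s => l.filter (fun p => p.2 == s))).Perm l
  | [], l, _, hmem => by
    have : l = [] := List.eq_nil_iff_forall_not_mem.2 (fun p hp => by simpa using hmem p hp)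
    simp [this]
  | s :: rest, l, hnd, hmem => by
    rw [List.nodup_cons] at hnd
    rw [List.flatMap_cons]
    have hcongr : rest.flatMap (fun s' => l.filter (fun p => p.2 == s')) =
        rest.flatMap (fun s' => (l.filter (fun p => !(p.2 == s))).filter (fun p => p.2 == s')) := by
      apply List.flatMap_congr
      intro s' hs'
      rw [List.filter_filter]
      apply List.filter_congr
      intro p _
      by_cases hp : p.2 = s'
      · have hss : ¬s' = s := by
          intro h
          exact hnd.1 (h ▸ hs')
        simp [hp, hss]
      · simp [hp]
    rw [hcongr]
    have hperm := pv_flatMap_filter_perm rest (l.filter (fun p => !(p.2 == s))) hnd.2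
      (fun p hp => by
        have hpl := (List.mem_filter.1 hp).1
        have hps : ¬(p.2 = s) := by simpa using (List.mem_filter.1 hp).2
        rcases List.mem_cons.1 (hmem p hpl) with h | h
        · exact absurd h hps
        · exact h)
    exact (hperm.append_left _).trans (List.filter_append_perm _ l)

-- bucket decomposition is pairwise pvR when scores descend and fsts ascend
lemma pv_flatMap_pairwise :
    ∀ (scores : List Int) (l : List (Int × Int)), scores.Pairwise (fun a b => b < a) →
    l.Pairwise (fun a b => a.1 < b.1) →
    (scores.flatMap (fun s => l.filter (fun p => p.2 == s))).Pairwise pvR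
  | [], _, _, _ => by simp
  | s :: rest, l, hs, hl => by
    rw [List.pairwise_cons] at hs
    rw [List.flatMap_cons]
    apply List.pairwise_append.2
    refine ⟨?_, pv_flatMap_pairwise rest l hs.2 hl, ?_⟩
    · refine List.Pairwise.imp_of_mem ?_ (hl.filter (fun p => p.2 == s))
      intro a b ha hb hab
      have has : a.2 = s := by simpa using (List.mem_filter.1 ha).2
      have hbs : b.2 = s := by simpa using (List.mem_filter.1 hb).2
      exact Or.inr ⟨by omega, hab⟩
    · intro a ha b hb
      have has : a.2 = s := by simpa using (List.mem_filter.1 ha).2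
      rcases List.mem_flatMap.1 hb with ⟨s', hs', hbf⟩
      have hbs : b.2 = s' := by simpa using (List.mem_filter.1 hbf).2
      exact Or.inl (by have := hs.1 s' hs'; omega)

-- weighted counting loop: the dict value is the initial value plus w times the count among looked-up values
lemma pv_getD_weightFold (bp : String) (w : Int) :
    ∀ (l : List (List (String × Int))) (d : PySem.Dict Int Int) (v : Int),
    PySem.Dict.getD (l.foldl (fun d row => PySem.Dict.insert d (pvKeyGet row bp) (PySem.Dict.getD d (pvKeyGet row bp) 0 + w)) d) v 0
      = PySem.Dict.getD d v 0 + w * ((l.map (fun row => pvKeyGet row bp)).count v : Int)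
  | [], d, v => by simp
  | row :: l, d, v => by
    rw [List.foldl_cons, pv_getD_weightFold bp w l _ v]
    by_cases h : pvKeyGet row bp = v
    · rw [h, PySem.Dict.getD_insert_self, List.map_cons, List.count_cons]
      simp [h]
      ring
    · rw [PySem.Dict.getD_insert_of_ne d _ _ (Ne.symm h), List.map_cons, List.count_cons]
      simp [h]

lemma pv_getD_empty (v : Int) : PySem.Dict.getD (PySem.Dict.empty : PySem.Dict Int Int) v 0 = 0 := rfl

lemma pvCut_nonneg (pd : List (List (String × Int))) : 0 ≤ pvCut pd := le_max_right _ _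

lemma pvG_val (pd : List (List (String × Int))) (bp : String) (v : Int) :
    pvG pd bp v = ((((pvR20 pd).take (pvCut pd).toNat).map (fun d => pvKeyGet d bp)).count v : Int)
      + 3 * ((((pvR20 pd).drop (pvCut pd).toNat).map (fun d => pvKeyGet d bp)).count v : Int) := by
  unfold pvG pvScore
  rw [PySem.List.slice_to _ (pvCut_nonneg pd), PySem.List.slice_from _ (pvCut_nonneg pd)]
  rw [pv_getD_weightFold, pv_getD_weightFold, pv_getD_empty]
  ring

lemma pvR20_eq (pd : List (List (String × Int))) : pvR20 pd = pd.drop (pd.length - 20) := by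
  unfold pvR20
  split_ifs with h
  · rw [PySem.List.slice_from_neg_ofNat pd 20 (by norm_num)]
  · have : pd.length - 20 = 0 := by omega
    rw [this, List.drop_zero]

lemma pvR10_eq (pd : List (List (String × Int))) : pvR10 pd = pd.drop (pd.length - 10) := by
  unfold pvR10
  split_ifs with h
  · rw [PySem.List.slice_from_neg_ofNat pd 10 (by norm_num)]
  · have : pd.length - 10 = 0 := by omega
    rw [this, List.drop_zero]

lemma pvLen20 (pd : List (List (String × Int))) : (pvR20 pd).length = pd.length - (pd.length - 20) := by
  rw [pvR20_eq, List.length_drop]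

lemma pvLate (pd : List (List (String × Int))) :
    (pvR20 pd).drop (pvCut pd).toNat = pd.drop (pd.length - 10) := by
  have hc : ((pvCut pd).toNat : Int) = pvCut pd := Int.toNat_of_nonneg (pvCut_nonneg pd)
  have hcut : pvCut pd = max (((pvR20 pd).length : Int) - 10) 0 := rfl
  have hlen := pvLen20 pd
  rw [pvR20_eq, List.drop_drop]
  congr 1
  rcases max_choice (((pvR20 pd).length : Int) - 10) 0 with hm | hm <;> rw [hm] at hcut <;> omega

lemma pvG_bound (pd : List (List (String × Int))) (bp : String) (v : Int) :
    0 ≤ pvG pd bp v ∧ pvG pd bp v ≤ 40 := by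
  rw [pvG_val]
  have hc : ((pvCut pd).toNat : Int) = pvCut pd := Int.toNat_of_nonneg (pvCut_nonneg pd)
  have hcut : pvCut pd = max (((pvR20 pd).length : Int) - 10) 0 := rfl
  have hlen := pvLen20 pd
  have h1 : (((pvR20 pd).take (pvCut pd).toNat).map (fun d => pvKeyGet d bp)).count v
      ≤ min (pvCut pd).toNat (pvR20 pd).length := by
    calc _ ≤ (((pvR20 pd).take (pvCut pd).toNat).map (fun d => pvKeyGet d bp)).length := List.count_le_length
    _ = _ := by rw [List.length_map, List.length_take]
  have h2 : (((pvR20 pd).drop (pvCut pd).toNat).map (fun d => pvKeyGet d bp)).count v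
      ≤ (pvR20 pd).length - (pvCut pd).toNat := by
    calc _ ≤ (((pvR20 pd).drop (pvCut pd).toNat).map (fun d => pvKeyGet d bp)).length := List.count_le_length
    _ = _ := by rw [List.length_map, List.length_drop]
  rcases max_choice (((pvR20 pd).length : Int) - 10) 0 with hm | hm <;> rw [hm] at hcut <;>
    constructor <;> omega

lemma pvF_eq_pvG (pd : List (List (String × Int))) (bp : String) (v : Int) :
    pvF pd bp v = pvG pd bp v := by
  have hsplit : ((List.count v ((pvR20 pd).map (fun d => pvKeyGet d bp))) : Int)
      = ((((pvR20 pd).take (pvCut pd).toNat).map (fun d => pvKeyGet d bp)).count v : Int)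
        + ((((pvR20 pd).drop (pvCut pd).toNat).map (fun d => pvKeyGet d bp)).count v : Int) := by
    conv_lhs => rw [← List.take_append_drop (pvCut pd).toNat (pvR20 pd)]
    rw [List.map_append, List.count_append]
    push_cast
    ring
  rw [pvG_val]
  unfold pvF
  rw [PySem.Dict.getD_counter, PySem.Dict.getD_counter, pvR10_eq, ← pvLate pd, hsplit]
  ring

-- the descending score list [40, …, 0]
lemma pvScores_desc : (PySem.List.pyRange 40 (-1) (-1)).Pairwise (fun a b => b < a) := by
  have h : PySem.List.pyRange 40 (-1) (-1) = (PySem.List.pyRange 0 41 1).reverse := by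
    rw [PySem.List.pyRange_neg_one_eq_reverse]
    norm_num
  rw [h, List.pairwise_reverse]
  exact PySem.List.pairwise_lt_pyRange_one 0 41

lemma pvScores_nodup : (PySem.List.pyRange 40 (-1) (-1)).Nodup := by
  have h : PySem.List.pyRange 40 (-1) (-1) = (PySem.List.pyRange 0 41 1).reverse := by
    rw [PySem.List.pyRange_neg_one_eq_reverse]
    norm_num
  rw [h, List.nodup_reverse]
  exact PySem.List.nodup_pyRange_one 0 41

-- core equivalence, abstract in the two score functions
lemma pv_core (f g : Int → Int) (hfg : ∀ v, f v = g v)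
    (hbound : ∀ v, 0 ≤ g v ∧ g v ≤ 40) (k : Int) :
    PySem.List.slice (PySem.List.sorted ((PySem.List.pyRange 1 46 1).map (fun num => (num, f num))) (fun x => -x.2) false) none (some k)
    = PySem.List.slice ((PySem.List.pyRange 40 (-1) (-1)).foldl (fun acc s =>
        (PySem.List.pyRange 1 46 1).foldl (fun acc num =>
          if g num == s then acc ++ [(num, s)] else acc) acc) []) none (some k) := by
  have hxs : ((PySem.List.pyRange 1 46 1).map (fun num => (num, g num))).Pairwise
      (fun a b : Int × Int => a.1 < b.1) := by
    rw [List.pairwise_map]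
    exact PySem.List.pairwise_lt_pyRange_one 1 46
  have hmem : ∀ p ∈ (PySem.List.pyRange 1 46 1).map (fun num => (num, g num)),
      p.2 ∈ PySem.List.pyRange 40 (-1) (-1) := by
    intro p hp
    rcases List.mem_map.1 hp with ⟨num, _, rfl⟩
    have hb := hbound num
    rw [PySem.List.mem_pyRange_neg_one]
    omega
  have key : PySem.List.sorted ((PySem.List.pyRange 1 46 1).map (fun num => (num, g num))) (fun x => -x.2) false
      = (PySem.List.pyRange 40 (-1) (-1)).flatMap (fun s =>
          ((PySem.List.pyRange 1 46 1).map (fun num => (num, g num))).filter (fun p => p.2 == s)) :=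
    List.eq_of_perm_of_sorted (fun a b _ _ h1 h2 => pvR_antisymm a b h1 h2)
      (pv_sorted_pairwise _ hxs)
      (pv_flatMap_pairwise _ _ pvScores_desc hxs)
      ((PySem.List.sorted_perm _ _ _).trans (pv_flatMap_filter_perm _ _ pvScores_nodup hmem).symm)
  have hout : (PySem.List.pyRange 40 (-1) (-1)).foldl (fun acc s =>
        (PySem.List.pyRange 1 46 1).foldl (fun acc num =>
          if g num == s then acc ++ [(num, s)] else acc) acc) []
      = (PySem.List.pyRange 40 (-1) (-1)).flatMap (fun s =>
          ((PySem.List.pyRange 1 46 1).filter (fun num => g num == s)).map (fun num => (num, s))) := by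
    have h1 : (fun (acc : List (Int × Int)) (s : Int) => (PySem.List.pyRange 1 46 1).foldl (fun acc num =>
          if g num == s then acc ++ [(num, s)] else acc) acc)
        = (fun acc s => acc ++ ((PySem.List.pyRange 1 46 1).filter (fun num => g num == s)).map (fun num => (num, s))) :=
      funext fun acc => funext fun s => PySem.List.foldl_append_if _ _ _ _
    rw [h1, PySem.List.foldl_append_eq_flatMap, List.nil_append]
  have hbuck : (fun s => ((PySem.List.pyRange 1 46 1).filter (fun num => g num == s)).map (fun num => (num, s)))
      = (fun s => ((PySem.List.pyRange 1 46 1).map (fun num => (num, g num))).filter (fun p => p.2 == s)) := by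
    funext s
    rw [List.filter_map]
    have hpred : ((fun p : Int × Int => p.2 == s) ∘ (fun num => (num, g num)))
        = (fun num => g num == s) := rfl
    rw [hpred]
    refine (List.map_congr_left ?_).symm
    intro a ha
    have : g a = s := by simpa using (List.mem_filter.1 ha).2
    rw [this]
  have hFG : (fun num => (num, f num)) = (fun num => (num, g num)) :=
    funext fun v => by rw [hfg]
  rw [hFG, key, hout, hbuck]

-- main equivalence
theorem pv_main (past_data : List (List (String × Int))) (ball_pos : String) (top_k : Int) :
    predict_ball_individual past_data ball_pos top_k = predict_ball_individual_alt past_data ball_pos top_k := by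
  unfold predict_ball_individual predict_ball_individual_alt
  dsimp only
  rw [PySem.List.foldl_append_singleton_eq_map, List.nil_append]
  exact pv_core _ _ (pvF_eq_pvG past_data ball_pos) (pvG_bound past_data ball_pos) top_k

-- ===== VERDICT (by name: the statement is the Claim_ definition above) =====
theorem predict_ball_individual_spec : Claim_equal_predict_ball_individual := by
  intro past_data ball_pos top_k _ _
  unfold Spec_predict_ball_individual
  exact pv_main past_data ball_pos top_k
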